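-- pv_equiv track=rewrite | github.com/OreNot/PythonRep | src/part_2/func_3.py | closest_mod_5
-- ===== SOURCE A (Python) =====
-- def closest_mod_5(x):
--     y = x
--     while True:
--      if y % 5 == 0 and y >= x:
--         return y
--         break
--      else:
--         y += 1
-- ===== SOURCE B (Python) =====
-- def closest_mod_5(x):
--     return x + (-x % 5)
-- ===== Notes on version B (the rewrite author's own statement) =====
-- stated objective: faster
-- what changed: Replaced the upward linear search for a multiple of 5 with the closed-form x + (-x % 5).
import Mathlib
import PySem

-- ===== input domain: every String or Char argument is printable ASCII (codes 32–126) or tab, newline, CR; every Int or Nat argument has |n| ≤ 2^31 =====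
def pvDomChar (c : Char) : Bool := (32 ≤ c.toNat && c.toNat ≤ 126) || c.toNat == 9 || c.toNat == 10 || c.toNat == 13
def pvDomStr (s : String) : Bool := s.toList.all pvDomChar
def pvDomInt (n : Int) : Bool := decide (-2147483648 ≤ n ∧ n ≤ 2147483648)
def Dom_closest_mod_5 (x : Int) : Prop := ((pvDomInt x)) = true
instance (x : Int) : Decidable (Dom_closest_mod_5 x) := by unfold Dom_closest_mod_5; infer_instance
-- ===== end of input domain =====

-- B replaces A's upward search loop with the closed form x + (-x % 5) (constant-factor faster, no loop).

-- ===== PORT A =====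
-- A's `while True` loop: y starts at x and increments until y % 5 == 0 and y >= x.
-- The fuel (5) only makes the identical computation total: starting at y = x the loop
-- always returns within 5 iterations, so the fuel is never exhausted on any input.
def pvLoopA (x : Int) : Int → Nat → Int
  | y, 0 => y
  | y, fuel + 1 =>
      if PySem.Int.mod y 5 = 0 ∧ y ≥ x then y else pvLoopA x (y + 1) fuel

def closest_mod_5 (x : Int) : Int := pvLoopA x x 5

-- ===== PORT B =====
def closest_mod_5_alt (x : Int) : Int := x + PySem.Int.mod (-x) 5

-- ===== PRECONDITION & SPEC =====
def Spec_closest_mod_5 (x : Int) (out : Int) : Prop := out = closest_mod_5_alt x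
instance (x : Int) (out : Int) : Decidable (Spec_closest_mod_5 x out) := by unfold Spec_closest_mod_5; infer_instance

-- ===== CLAIM (what is proved, stated in full; the proofs are below) =====
def Claim_equal_closest_mod_5 : Prop := ∀ (x : Int), Dom_closest_mod_5 x → Spec_closest_mod_5 x (closest_mod_5 x)

-- ===== LEMMAS AND PROOFS =====

theorem pv_mod_eq (a : Int) : PySem.Int.mod a 5 = a % 5 :=
  PySem.Int.mod_eq_emod_of_pos (by norm_num)

-- One unfolding step of the loop.
theorem loop_step (x y : Int) (fuel : Nat) :
    pvLoopA x y (fuel + 1) =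
      if PySem.Int.mod y 5 = 0 ∧ y ≥ x then y else pvLoopA x (y + 1) fuel := rfl

-- ===== VERDICT (by name: the statement is the Claim_ definition above) =====
theorem closest_mod_5_spec : Claim_equal_closest_mod_5 := by
  intro x _
  show closest_mod_5 x = closest_mod_5_alt x
  unfold closest_mod_5 closest_mod_5_alt
  rw [pv_mod_eq]
  show pvLoopA x x (4 + 1) = x + (-x) % 5
  rw [loop_step, pv_mod_eq]
  by_cases c0 : x % 5 = 0
  · rw [if_pos ⟨c0, by omega⟩]; omega
  rw [if_neg (by intro h; omega), loop_step, pv_mod_eq]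
  by_cases c1 : x % 5 = 4
  · rw [if_pos ⟨by omega, by omega⟩]; omega
  rw [if_neg (by intro h; omega), loop_step, pv_mod_eq]
  by_cases c2 : x % 5 = 3
  · rw [if_pos ⟨by omega, by omega⟩]; omega
  rw [if_neg (by intro h; omega), loop_step, pv_mod_eq]
  by_cases c3 : x % 5 = 2
  · rw [if_pos ⟨by omega, by omega⟩]; omega
  rw [if_neg (by intro h; omega), loop_step, pv_mod_eq]
  rw [if_pos ⟨by omega, by omega⟩]; omega
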